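-- pv_equiv track=rewrite | github.com/karthik789338/scholargraph | src/baselines/qasper_answer_baseline.py | shorten_answer
-- ===== SOURCE A (Python) =====
-- def normalize_text(text: str | None) -> str:
--     if text is None:
--         return ""
--     return " ".join(str(text).split()).strip()
--
-- def shorten_answer(text: str, max_words: int = 10) -> str:
--     text = normalize_text(text)
--
--     for sep in [".", ";", ":", "\n"]:
--         if sep in text:
--             text = text.split(sep)[0].strip()
--
--     words = text.split()
--     if len(words) > max_words:
--         text = " ".join(words[:max_words]).strip()
--
--     return text
-- ===== SOURCE B (Python) =====
-- def normalize_text(text):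
--     if text is None:
--         return ""
--     return " ".join(str(text).split()).strip()
--
-- def shorten_answer(text, max_words=10):
--     # Cut at the earliest clause separator with a single character scan,
--     # instead of A's four successive split-and-strip passes.
--     t = normalize_text(text)
--     i = 0
--     while i < len(t) and t[i] not in ".;:\n":
--         i += 1
--     head = t[:i].strip()
--     words = head.split()
--     if len(words) > max_words:
--         head = " ".join(words[:max_words]).strip()
--     return head
-- ===== Notes on version B (the rewrite author's own statement) =====
-- stated objective: simpler
-- what changed: A's four successive split-and-strip passes (one per clause separator) are replaced by a single left-to-right character scan that finds the earliest separator position and slices once.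
import Mathlib
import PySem

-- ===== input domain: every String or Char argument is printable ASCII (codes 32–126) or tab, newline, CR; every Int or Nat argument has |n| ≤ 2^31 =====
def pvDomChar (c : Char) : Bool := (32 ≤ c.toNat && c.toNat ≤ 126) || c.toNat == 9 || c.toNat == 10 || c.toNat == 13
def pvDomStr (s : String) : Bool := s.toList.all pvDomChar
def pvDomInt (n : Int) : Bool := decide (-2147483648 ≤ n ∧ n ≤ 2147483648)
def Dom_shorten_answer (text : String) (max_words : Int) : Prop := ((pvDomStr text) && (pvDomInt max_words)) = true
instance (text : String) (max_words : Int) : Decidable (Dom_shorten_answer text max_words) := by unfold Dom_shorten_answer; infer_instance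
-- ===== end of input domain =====

-- B replaces A's four successive split(sep)[0].strip() passes by a single character
-- scan for the earliest separator followed by one slice; same return value everywhere.

-- ===== PORT A =====
-- normalize_text: " ".join(str(text).split()).strip()  (text is a str here, so str(text) = text)
def pvNormalize (text : String) : String :=
  PySem.Str.strip (PySem.Str.join " " (PySem.Str.split₀ text))

def shorten_answer (text : String) (max_words : Int) : String :=
  let t0 := pvNormalize text
  -- for sep in [".", ";", ":", "\n"]: if sep in text: text = text.split(sep)[0].strip()
  let t := [".", ";", ":", "\n"].foldl (fun t sep =>
      if PySem.Str.isIn sep t then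
        PySem.Str.strip ((PySem.List.pyGet? ((PySem.Str.split? t sep).getD []) 0).getD "")
      else t) t0
  let words := PySem.Str.split₀ t
  if max_words < (words.length : Int) then
    PySem.Str.strip (PySem.Str.join " " (PySem.List.slice words none (some max_words)))
  else t

-- ===== PORT B =====
-- the while loop 'while i < len(t) and t[i] not in ".;:\n": i += 1' as a structural scan
def pvCutIdx : List Char → Nat
  | [] => 0
  | c :: rest => if PySem.Chars.isIn [c] ".;:\n".toList then 0 else pvCutIdx rest + 1

def shorten_answer_alt (text : String) (max_words : Int) : String :=
  let t := pvNormalize text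
  let i : Nat := pvCutIdx t.toList
  let head := PySem.Str.strip (PySem.Str.slice t none (some (i : Int)))   -- t[:i].strip()
  let words := PySem.Str.split₀ head
  if max_words < (words.length : Int) then
    PySem.Str.strip (PySem.Str.join " " (PySem.List.slice words none (some max_words)))
  else head

-- ===== PRECONDITION & SPEC =====
def Spec_shorten_answer (text : String) (max_words : Int) (out : String) : Prop := out = shorten_answer_alt text max_words
instance (text : String) (max_words : Int) (out : String) : Decidable (Spec_shorten_answer text max_words out) := by unfold Spec_shorten_answer; infer_instance

-- ===== CLAIM (what is proved, stated in full; the proofs are below) =====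
def Claim_equal_shorten_answer : Prop := ∀ (text : String) (max_words : Int), Dom_shorten_answer text max_words → Spec_shorten_answer text max_words (shorten_answer text max_words)

-- ===== LEMMAS AND PROOFS =====

theorem pvSplitOn_go_head (c : Char) :
    ∀ (fuel : Nat) (l cur : List Char) (acc : List (List Char)), l.length < fuel →
      ∃ tail, PySem.Chars.splitOn.go [c] fuel l cur acc =
        acc.reverse ++ (cur.reverse ++ l.takeWhile (fun x => x != c)) :: tail := by
  intro fuel
  induction fuel with
  | zero => intro l cur acc h; omega
  | succ fuel ih =>
    intro l cur acc h
    cases l with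
    | nil =>
      exact ⟨[], by simp [PySem.Chars.splitOn.go]⟩
    | cons a rest =>
      rw [PySem.Chars.splitOn.go]
      by_cases hac : a = c
      · subst hac
        have hp : [a].isPrefixOf (a :: rest) = true := by simp [List.isPrefixOf]
        simp only [hp, if_pos]
        have hd : List.drop [a].length (a::rest) = rest := rfl
        rw [hd]
        obtain ⟨tail, ht⟩ := ih rest [] (cur.reverse :: acc) (by simp at h; omega)
        refine ⟨(([] : List Char).reverse ++ rest.takeWhile (fun x => x != a)) :: tail, ?_⟩
        rw [ht]
        simp [List.takeWhile_cons]
      · have hp : [c].isPrefixOf (a :: rest) = false := by simp [List.isPrefixOf]; exact fun h => absurd h.symm hac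
        simp only [hp, Bool.false_eq_true, if_neg, not_false_iff]
        obtain ⟨tail, ht⟩ := ih rest (a :: cur) acc (by simp at h ⊢; omega)
        refine ⟨tail, ?_⟩
        rw [ht]
        simp [List.takeWhile_cons, bne, hac]

theorem pvMem_strip {x : Char} {s : List Char} (h : x ∈ PySem.Chars.strip s) : x ∈ s := by
  simp only [PySem.Chars.strip, PySem.Chars.rstrip, PySem.Chars.lstrip, List.mem_reverse] at h
  have h1 := (List.dropWhile_sublist (l := (List.dropWhile PySem.Chars.isspace s).reverse) PySem.Chars.isspace).mem h
  rw [List.mem_reverse] at h1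
  exact (List.dropWhile_sublist PySem.Chars.isspace).mem h1

theorem pvDropWhile_idem (p : Char → Bool) (l : List Char) :
    List.dropWhile p (List.dropWhile p l) = List.dropWhile p l := by
  induction l with
  | nil => rfl
  | cons a l ih =>
    by_cases h : p a
    · simpa [List.dropWhile_cons, h] using ih
    · simp [List.dropWhile_cons, h]

-- rstrip (lstrip s) has a non-whitespace head (when nonempty); lstrip of it is a no-op
theorem pvLstrip_rstrip_lstrip (s : List Char) :
    PySem.Chars.lstrip (PySem.Chars.rstrip (PySem.Chars.lstrip s)) = PySem.Chars.rstrip (PySem.Chars.lstrip s) := by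
  simp only [PySem.Chars.lstrip, PySem.Chars.rstrip]
  cases hu : List.dropWhile PySem.Chars.isspace s with
  | nil => simp
  | cons a v =>
    have ha : PySem.Chars.isspace a = false := by
      have hne : List.dropWhile PySem.Chars.isspace s ≠ [] := by simp [hu]
      have := List.head_dropWhile_not PySem.Chars.isspace hne
      simpa [hu] using this
    rw [show (a :: v).reverse = v.reverse ++ [a] by simp]
    rw [List.dropWhile_append]
    by_cases he : (List.dropWhile PySem.Chars.isspace v.reverse).isEmpty
    · simp [he, ha, List.dropWhile_cons]
    · simp only [he, if_neg, Bool.false_eq_true, not_false_iff]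
      simp [List.dropWhile_cons, ha]

theorem pvStrip_strip (s : List Char) : PySem.Chars.strip (PySem.Chars.strip s) = PySem.Chars.strip s := by
  simp only [PySem.Chars.strip]
  rw [pvLstrip_rstrip_lstrip]
  simp only [PySem.Chars.rstrip, List.reverse_reverse]
  rw [pvDropWhile_idem]

theorem pvTakeWhile_dropWhile (q : Char → Bool) (hq : ∀ c, PySem.Chars.isspace c = true → q c = true)
    (u : List Char) :
    List.takeWhile q (List.dropWhile PySem.Chars.isspace u) =
      List.dropWhile PySem.Chars.isspace (List.takeWhile q u) := by
  induction u with
  | nil => rfl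
  | cons a l ih =>
    by_cases hw : PySem.Chars.isspace a
    · simp [List.dropWhile_cons, List.takeWhile_cons, hw, hq a hw, ih]
    · simp only [List.dropWhile_cons, hw, Bool.false_eq_true, if_neg, not_false_iff]
      by_cases hqa : q a
      · simp [List.takeWhile_cons, hqa, List.dropWhile_cons, hw]
      · simp [List.takeWhile_cons, hqa]

theorem pvRstrip_append_ws (x w : List Char) (hw : ∀ c ∈ w, PySem.Chars.isspace c = true) :
    PySem.Chars.rstrip (x ++ w) = PySem.Chars.rstrip x := by
  simp only [PySem.Chars.rstrip, List.reverse_append]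
  rw [List.dropWhile_append]
  have : List.dropWhile PySem.Chars.isspace w.reverse = [] :=
    List.dropWhile_eq_nil_iff.mpr (fun c hc => hw c (List.mem_reverse.mp hc))
  simp [this]

theorem pvRstrip_takeWhile_rstrip (q : Char → Bool) (hq : ∀ c, PySem.Chars.isspace c = true → q c = true)
    (v : List Char) :
    PySem.Chars.rstrip (List.takeWhile q (PySem.Chars.rstrip v)) =
      PySem.Chars.rstrip (List.takeWhile q v) := by
  have hv : v = PySem.Chars.rstrip v ++ (List.takeWhile PySem.Chars.isspace v.reverse).reverse := by
    simp only [PySem.Chars.rstrip]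
    conv_rhs => rw [← List.reverse_append, List.takeWhile_append_dropWhile, List.reverse_reverse]
  have hw : ∀ c ∈ (List.takeWhile PySem.Chars.isspace v.reverse).reverse, PySem.Chars.isspace c = true := by
    intro c hc
    exact List.mem_takeWhile_imp (List.mem_reverse.mp hc)
  conv_rhs => rw [hv]
  rw [List.takeWhile_append]
  by_cases hl : (List.takeWhile q (PySem.Chars.rstrip v)).length = (PySem.Chars.rstrip v).length
  · have heq : List.takeWhile q (PySem.Chars.rstrip v) = PySem.Chars.rstrip v :=
      (List.takeWhile_prefix q).eq_of_length hl
    have hwq : List.takeWhile q (List.takeWhile PySem.Chars.isspace v.reverse).reverse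
        = (List.takeWhile PySem.Chars.isspace v.reverse).reverse :=
      List.takeWhile_eq_self_iff.mpr (fun c hc => hq c (hw c hc))
    rw [if_pos hl, hwq, pvRstrip_append_ws _ _ hw, heq]
  · rw [if_neg hl]

theorem pvStrip_takeWhile_strip (q : Char → Bool) (hq : ∀ c, PySem.Chars.isspace c = true → q c = true)
    (u : List Char) :
    PySem.Chars.strip (List.takeWhile q (PySem.Chars.strip u)) =
      PySem.Chars.strip (List.takeWhile q u) := by
  simp only [PySem.Chars.strip]
  have hT3 : PySem.Chars.lstrip (List.takeWhile q (PySem.Chars.rstrip (PySem.Chars.lstrip u)))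
      = List.takeWhile q (PySem.Chars.rstrip (PySem.Chars.lstrip u)) := by
    cases hu : PySem.Chars.rstrip (PySem.Chars.lstrip u) with
    | nil => simp [PySem.Chars.lstrip]
    | cons a v =>
      have ha : PySem.Chars.isspace a = false := by
        have := pvLstrip_rstrip_lstrip u
        rw [hu] at this
        simp only [PySem.Chars.lstrip, List.dropWhile_cons] at this
        by_cases h : PySem.Chars.isspace a
        · rw [if_pos h] at this
          have := congrArg List.length this
          simp at this
          have hsub := List.dropWhile_sublist (l := v) PySem.Chars.isspace
          have := hsub.length_le
          omega
        · simpa using h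
      by_cases hqa : q a
      · simp [List.takeWhile_cons, hqa, PySem.Chars.lstrip, List.dropWhile_cons, ha]
      · simp [List.takeWhile_cons, hqa, PySem.Chars.lstrip]
  rw [hT3, pvRstrip_takeWhile_rstrip q hq]
  simp only [PySem.Chars.lstrip]
  rw [pvTakeWhile_dropWhile q hq]

theorem pvSplitOn_cons (c : Char) (s : List Char) :
    ∃ tail, PySem.Chars.splitOn s [c] = (s.takeWhile (fun x => x != c)) :: tail := by
  obtain ⟨tail, ht⟩ := pvSplitOn_go_head c (s.length + 1) s [] [] (by omega)
  exact ⟨tail, by simpa using ht⟩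

theorem pvIsIn_singleton' (c : Char) (s : List Char) :
    PySem.Chars.isIn [c] s = true ↔ c ∈ s := by
  rw [PySem.Chars.isIn_iff_infix, List.singleton_infix_iff]

theorem pvStepStr (c : Char) (sep t : String) (hsep : sep.toList = [c])
    (hs : PySem.Chars.strip t.toList = t.toList) :
    (if PySem.Str.isIn sep t then
        PySem.Str.strip ((PySem.List.pyGet? ((PySem.Str.split? t sep).getD []) 0).getD "")
      else t)
    = String.ofList (PySem.Chars.strip (t.toList.takeWhile (fun x => x != c))) := by
  have hiin : PySem.Str.isIn sep t = PySem.Chars.isIn [c] t.toList := by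
    simp [PySem.Str.isIn, hsep]
  cases h : PySem.Chars.isIn [c] t.toList with
  | true =>
    rw [hiin, h, if_pos rfl]
    obtain ⟨tail, ht⟩ := pvSplitOn_cons c t.toList
    rw [PySem.Str.split?, hsep]
    simp only [PySem.Chars.split?, List.isEmpty_cons, if_neg, Bool.false_eq_true, not_false_iff, ht]
    simp [PySem.List.pyGet?, PySem.List.pyIdx?, PySem.Str.strip]
  | false =>
    rw [hiin, h]
    simp only [Bool.false_eq_true, if_neg, not_false_iff]
    have hm : c ∉ t.toList := fun hc => by simp [(pvIsIn_singleton' c t.toList).mpr hc] at h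
    have htw : t.toList.takeWhile (fun x => x != c) = t.toList :=
      List.takeWhile_eq_self_iff.mpr (fun x hx => by
        simp only [bne_iff_ne, ne_eq, decide_eq_true_eq]
        exact fun hxc => hm (hxc ▸ hx))
    rw [htw, hs, String.ofList_toList]

theorem pvSplit₀_no_ws :
    ∀ (l cur : List Char) (acc : List (List Char)),
      (∀ x ∈ cur, PySem.Chars.isspace x = false) →
      (∀ p ∈ acc, ∀ x ∈ p, PySem.Chars.isspace x = false) →
      ∀ p ∈ PySem.Chars.split₀.go l cur acc, ∀ x ∈ p, PySem.Chars.isspace x = false := by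
  intro l
  induction l with
  | nil =>
    intro cur acc hcur hacc p hp x hx
    rw [PySem.Chars.split₀.go] at hp
    by_cases he : cur.isEmpty
    · simp only [he, if_pos, List.mem_reverse] at hp
      exact hacc p hp x hx
    · simp only [he, Bool.false_eq_true, if_neg, not_false_iff, List.mem_reverse, List.mem_cons] at hp
      rcases hp with hp | hp
      · exact hcur x (by rw [hp] at hx; simpa using hx)
      · exact hacc p hp x hx
  | cons a rest ih =>
    intro cur acc hcur hacc p hp x hx
    rw [PySem.Chars.split₀.go] at hp
    by_cases hw : PySem.Chars.isspace a
    · simp only [hw, if_pos] at hp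
      by_cases he : cur.isEmpty
      · simp only [he, if_pos] at hp
        exact ih [] acc (by simp) hacc p hp x hx
      · simp only [he, Bool.false_eq_true, if_neg, not_false_iff] at hp
        refine ih [] (cur.reverse :: acc) (by simp) ?_ p hp x hx
        intro q hq y hy
        rcases List.mem_cons.mp hq with hq | hq
        · exact hcur y (by rw [hq] at hy; simpa using hy)
        · exact hacc q hq y hy
    · simp only [hw, Bool.false_eq_true, if_neg, not_false_iff] at hp
      refine ih (a :: cur) acc ?_ hacc p hp x hx
      intro y hy
      rcases List.mem_cons.mp hy with hy | hy
      · simpa [hy] using hw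
      · exact hcur y hy

theorem pvMem_join (sep : List Char) (parts : List (List Char)) {x : Char}
    (h : x ∈ PySem.Chars.join sep parts) : x ∈ sep ∨ ∃ p ∈ parts, x ∈ p := by
  induction parts with
  | nil => simp [PySem.Chars.join, List.intercalate] at h
  | cons a rest ih =>
    cases rest with
    | nil =>
      rw [PySem.Chars.join_singleton] at h
      exact Or.inr ⟨a, by simp, h⟩
    | cons b rest' =>
      rw [PySem.Chars.join_cons_cons] at h
      simp only [List.mem_append] at h
      rcases h with (h | h) | h
      · exact Or.inr ⟨a, by simp, h⟩
      · exact Or.inl h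
      · rcases ih h with h | ⟨p, hp, hx⟩
        · exact Or.inl h
        · exact Or.inr ⟨p, by simp [List.mem_cons.mp hp], hx⟩

theorem pvNormalize_toList (s : String) :
    (pvNormalize s).toList =
      PySem.Chars.strip (PySem.Chars.join [' '] ((PySem.Chars.split₀ s.toList))) := by
  simp [pvNormalize, PySem.Str.strip, PySem.Str.join, PySem.Str.split₀,
    List.map_map, Function.comp_def]

theorem pvNoNl (s : String) : '\n' ∉ (pvNormalize s).toList := by
  rw [pvNormalize_toList]
  intro h
  have h1 := pvMem_strip h
  rcases pvMem_join _ _ h1 with h2 | ⟨p, hp, hx⟩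
  · simp at h2
  · have := pvSplit₀_no_ws s.toList [] [] (by simp) (by simp) p (by simpa [PySem.Chars.split₀] using hp) '\n' hx
    simp [PySem.Chars.isspace] at this

theorem pvNormStripped (s : String) :
    PySem.Chars.strip (pvNormalize s).toList = (pvNormalize s).toList := by
  rw [pvNormalize_toList, pvStrip_strip]

theorem pvWsNe (c0 : Char) (h : PySem.Chars.isspace c0 = false) :
    ∀ c, PySem.Chars.isspace c = true → (c != c0) = true := by
  intro c hc
  simp only [bne_iff_ne, ne_eq]
  rintro rfl
  rw [hc] at h
  cases h

theorem pvNotIn {c : Char} {l : List Char} (hm : c ∉ l) : PySem.Chars.isIn [c] l = false := by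
  cases h : PySem.Chars.isIn [c] l with
  | false => rfl
  | true => exact absurd ((pvIsIn_singleton' c l).mp h) hm

theorem pvIsIn_seps (x : Char) :
    PySem.Chars.isIn [x] ".;:\n".toList = (x == '.' || x == ';' || x == ':' || x == '\n') := by
  cases h : PySem.Chars.isIn [x] ".;:\n".toList with
  | true =>
    have := (pvIsIn_singleton' x _).mp h
    have hm : x = '.' ∨ x = ';' ∨ x = ':' ∨ x = '\n' := by
      simpa using this
    rcases hm with rfl | rfl | rfl | rfl <;> simp
  | false =>
    have hm : x ∉ ".;:\n".toList := fun hx => by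
      have h2 := (pvIsIn_singleton' x (".;:\n".toList)).mpr hx
      rw [h2] at h
      cases h
    have hne : ¬(x = '.' ∨ x = ';' ∨ x = ':' ∨ x = '\n') := fun hx => hm (by simpa using hx)
    rw [not_or, not_or, not_or] at hne
    obtain ⟨h1, h2, h3, h4⟩ := hne
    simp [h1, h2, h3, h4]

theorem pvCutIdx_take (t : List Char) :
    t.take (pvCutIdx t) = t.takeWhile (fun c => !PySem.Chars.isIn [c] ".;:\n".toList) := by
  induction t with
  | nil => rfl
  | cons a l ih =>
    simp only [pvCutIdx, List.takeWhile_cons]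
    cases h : PySem.Chars.isIn [a] ".;:\n".toList with
    | true => simp [h]
    | false => simp [h, ih]

theorem pvTakeWhile_congr {p q : Char → Bool} {l : List Char} (h : ∀ x ∈ l, p x = q x) :
    l.takeWhile p = l.takeWhile q := by
  induction l with
  | nil => rfl
  | cons a l ih =>
    simp only [List.takeWhile_cons, h a (by simp)]
    cases hq : q a with
    | false => rfl
    | true => simp [ih (fun x hx => h x (by simp [hx]))]

theorem pvKey (s : String) :
    ([".", ";", ":", "\n"].foldl (fun t sep =>
      if PySem.Str.isIn sep t then
        PySem.Str.strip ((PySem.List.pyGet? ((PySem.Str.split? t sep).getD []) 0).getD "")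
      else t) (pvNormalize s)) =
    PySem.Str.strip (PySem.Str.slice (pvNormalize s) none (some ((pvCutIdx (pvNormalize s).toList : Nat) : Int))) := by
  have h0 := pvNormStripped s
  have hnl := pvNoNl s
  simp only [List.foldl]
  rw [pvStepStr '.' "." (pvNormalize s) (by decide) h0]
  rw [pvStepStr ';' ";" _ (by decide)
    (by rw [String.toList_ofList]; exact pvStrip_strip _)]
  rw [pvStepStr ':' ":" _ (by decide)
    (by rw [String.toList_ofList]; exact pvStrip_strip _)]
  simp only [String.toList_ofList]
  rw [pvStrip_takeWhile_strip _ (pvWsNe ';' (by decide))]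
  rw [pvStrip_takeWhile_strip _ (pvWsNe ':' (by decide))]
  -- the newline pass is a no-op
  have hnl3 : '\n' ∉ PySem.Chars.strip
      (List.takeWhile (fun x => x != ':') (List.takeWhile (fun x => x != ';')
        (List.takeWhile (fun x => x != '.') (pvNormalize s).toList))) := by
    intro hx
    exact hnl ((List.takeWhile_sublist _).mem ((List.takeWhile_sublist _).mem
      ((List.takeWhile_sublist _).mem (pvMem_strip hx))))
  have hisin : PySem.Str.isIn "\n" (String.ofList (PySem.Chars.strip
      (List.takeWhile (fun x => x != ':') (List.takeWhile (fun x => x != ';')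
        (List.takeWhile (fun x => x != '.') (pvNormalize s).toList))))) = false := by
    show PySem.Chars.isIn "\n".toList _ = false
    rw [show "\n".toList = ['\n'] from rfl]
    rw [pvNotIn (by rw [String.toList_ofList]; exact hnl3)]
  rw [hisin]
  simp only [Bool.false_eq_true, if_neg, not_false_iff]
  have hB : (PySem.Str.slice (pvNormalize s) none (some ((pvCutIdx (pvNormalize s).toList : Nat) : Int))).toList
      = List.takeWhile (fun c => !PySem.Chars.isIn [c] ".;:\n".toList) (pvNormalize s).toList := by
    rw [PySem.Str.toList_slice, PySem.Chars.slice_eq_listSlice,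
      PySem.List.slice_to _ (by positivity), Int.toNat_natCast, pvCutIdx_take]
  rw [PySem.Str.strip, hB]
  refine congrArg String.ofList (congrArg PySem.Chars.strip ?_)
  rw [List.takeWhile_takeWhile, List.takeWhile_takeWhile]
  refine pvTakeWhile_congr ?_
  intro x hx
  have hxn : x ≠ '\n' := fun h => hnl (h ▸ hx)
  simp only [pvIsIn_seps]
  by_cases h1 : x = '.' <;> by_cases h2 : x = ';' <;> by_cases h3 : x = ':' <;>
    simp [h1, h2, h3, hxn]

-- ===== VERDICT (by name: the statement is the Claim_ definition above) =====
theorem shorten_answer_spec : Claim_equal_shorten_answer := by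
  intro text max_words _
  unfold Spec_shorten_answer shorten_answer shorten_answer_alt
  simp only []
  rw [pvKey text]
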